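-- pv_equiv track=rewrite | github.com/chasecotton27/Financial-Advisor-Tool | personal_finances_module.py | only_include_month_and_year
-- ===== SOURCE A (Python) =====
-- def only_include_month_and_year(transactions, month, year):
--
--   transactions_during_month_and_year = []
--   alternate_month = '0' + month
--   alternate_year = '20' + year
--
--   for row in transactions:
--     month_letters = []
--     year_letters = []
--     date = row[0]
--     for letter in date:
--       if letter == '/':
--         break
--       else:
--         month_letters.append(letter)
--     for letter in date[::-1]:
--       if letter == '/':
--         break
--       else:
--         year_letters.append(letter)
--     combined_month_letters = ''.join(month_letters)
--     combined_year_letters = ''.join(year_letters)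
--     reversed_year_letters = combined_year_letters[::-1]
--     if (combined_month_letters == month or combined_month_letters == alternate_month) and (reversed_year_letters == year or reversed_year_letters == alternate_year):
--       transactions_during_month_and_year.append(row)
--
--   return transactions_during_month_and_year
-- ===== SOURCE B (Python) =====
-- def only_include_month_and_year(transactions, month, year):
--   months = (month, '0' + month)
--   years = (year, '20' + year)
--
--   def keep(row):
--     parts = row[0].split('/')
--     return parts[0] in months and parts[-1] in years
--
--   return [row for row in transactions if keep(row)]
-- ===== Notes on version B (the rewrite author's own statement) =====
-- stated objective: simpler
-- what changed: B replaces A's two manual character loops (forward scan and scan of the reversed date, plus a re-reverse) with one split of the date on '/' taking the first and last part, and replaces the explicit append-accumulator loop with a filter over a membership test.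
import Mathlib
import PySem

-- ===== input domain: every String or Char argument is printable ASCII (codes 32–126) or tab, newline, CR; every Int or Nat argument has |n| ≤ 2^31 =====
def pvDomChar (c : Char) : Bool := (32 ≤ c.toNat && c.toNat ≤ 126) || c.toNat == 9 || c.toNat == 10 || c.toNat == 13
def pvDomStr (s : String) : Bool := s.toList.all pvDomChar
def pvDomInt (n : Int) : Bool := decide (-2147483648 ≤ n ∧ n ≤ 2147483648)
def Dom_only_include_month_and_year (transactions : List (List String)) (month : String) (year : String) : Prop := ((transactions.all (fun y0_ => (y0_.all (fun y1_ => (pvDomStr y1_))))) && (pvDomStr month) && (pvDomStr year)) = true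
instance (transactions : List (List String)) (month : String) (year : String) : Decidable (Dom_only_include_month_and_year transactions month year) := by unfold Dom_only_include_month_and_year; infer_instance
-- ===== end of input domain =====

-- B replaces A's two manual char-by-char scans (forward and over the reversed date) with one
-- split on '/' taking the first and last part, and the append loop with a filter (objective: simpler).

-- ===== PORT A =====
-- the "for letter in date: if letter == '/': break; else: append(letter)" loop
def pvScan : List Char → List Char
  | [] => []
  | c :: rest => if c == '/' then [] else c :: pvScan rest

def only_include_month_and_year (transactions : List (List String)) (month : String) (year : String) : List (List String) :=
  let alternate_month := "0" ++ month
  let alternate_year := "20" ++ year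
  transactions.foldl (fun acc row =>
    -- row[0]: pyGetD is exact under Pre_ (every row nonempty; Python raises IndexError otherwise)
    let date := PySem.List.pyGetD row 0 ""
    let month_letters := pvScan date.toList
    let year_letters := pvScan ((PySem.List.slice? date.toList none none (-1)).getD [])
    let combined_month_letters := String.ofList month_letters
    let combined_year_letters := String.ofList year_letters
    let reversed_year_letters := String.ofList ((PySem.List.slice? combined_year_letters.toList none none (-1)).getD [])
    if (combined_month_letters == month || combined_month_letters == alternate_month)
        && (reversed_year_letters == year || reversed_year_letters == alternate_year)
    then acc ++ [row] else acc) []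

-- ===== PORT B =====
def pvKeep (months years : List String) (row : List String) : Bool :=
  let parts := (PySem.Str.split? (PySem.List.pyGetD row 0 "") "/").getD []
  months.contains (PySem.List.pyGetD parts 0 "") && years.contains (PySem.List.pyGetD parts (-1) "")

def only_include_month_and_year_alt (transactions : List (List String)) (month : String) (year : String) : List (List String) :=
  let months := [month, "0" ++ month]
  let years := [year, "20" ++ year]
  transactions.filter (pvKeep months years)

-- ===== PRECONDITION & SPEC =====
-- Pre_ excludes transactions containing an empty row: Python A raises IndexError on row[0] there (B raises too).
def Pre_only_include_month_and_year (transactions : List (List String)) (month : String) (year : String) : Prop :=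
  ∀ row ∈ transactions, row ≠ []
instance (transactions : List (List String)) (month : String) (year : String) : Decidable (Pre_only_include_month_and_year transactions month year) := by unfold Pre_only_include_month_and_year; infer_instance

def pvWitness_only_include_month_and_year : List (List String) × String × String :=
  ([["3/14/22", "coffee"], ["03/2/21", "rent"], ["nodate"]], "3", "22")

def Spec_only_include_month_and_year (transactions : List (List String)) (month : String) (year : String) (out : List (List String)) : Prop := out = only_include_month_and_year_alt transactions month year
instance (transactions : List (List String)) (month : String) (year : String) (out : List (List String)) : Decidable (Spec_only_include_month_and_year transactions month year out) := by unfold Spec_only_include_month_and_year; infer_instance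

-- ===== CLAIM (what is proved, stated in full; the proofs are below) =====
def Claim_equal_only_include_month_and_year : Prop := ∀ (transactions : List (List String)) (month : String) (year : String), Dom_only_include_month_and_year transactions month year → Pre_only_include_month_and_year transactions month year → Spec_only_include_month_and_year transactions month year (only_include_month_and_year transactions month year)

-- ===== LEMMAS AND PROOFS =====

-- reference splitter: what Python's date.split('/') computes, char by char
def pvSplitChar : List Char → List (List Char)
  | [] => [[]]
  | c :: rest => if c = '/' then [] :: pvSplitChar rest else (pvSplitChar rest).modifyHead (c :: ·)

theorem pvSplitChar_ne_nil (cs : List Char) : pvSplitChar cs ≠ [] := by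
  induction cs with
  | nil => simp [pvSplitChar]
  | cons c rest ih =>
    simp only [pvSplitChar]
    split_ifs
    · simp
    · cases h : pvSplitChar rest with
      | nil => exact absurd h ih
      | cons a t => simp [List.modifyHead]

theorem pvScan_of_not_mem {cs : List Char} (h : '/' ∉ cs) : pvScan cs = cs := by
  induction cs with
  | nil => rfl
  | cons c rest ih =>
    simp only [List.mem_cons, not_or] at h
    simp [pvScan, Ne.symm h.1, ih h.2]

theorem pvScan_append (xs ys : List Char) :
    pvScan (xs ++ ys) = if '/' ∈ xs then pvScan xs else xs ++ pvScan ys := by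
  induction xs with
  | nil => simp
  | cons c rest ih =>
    by_cases hc : c = '/'
    · simp [pvScan, hc]
    · have hcb : (c == '/') = false := by simp [hc]
      by_cases hm : '/' ∈ rest <;>
        simp [pvScan, hcb, ih, List.mem_cons, Ne.symm hc, hm]

theorem pvSplitChar_of_not_mem {cs : List Char} (h : '/' ∉ cs) : pvSplitChar cs = [cs] := by
  induction cs with
  | nil => rfl
  | cons c rest ih =>
    simp only [List.mem_cons, not_or] at h
    simp [pvSplitChar, Ne.symm h.1, ih h.2, List.modifyHead]

theorem pvSplitChar_two_le {cs : List Char} (h : '/' ∈ cs) : 2 ≤ (pvSplitChar cs).length := by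
  induction cs with
  | nil => simp at h
  | cons c rest ih =>
    by_cases hc : c = '/'
    · have h1 : 1 ≤ (pvSplitChar rest).length :=
        List.length_pos_iff.mpr (pvSplitChar_ne_nil rest)
      simp only [pvSplitChar, if_pos hc, List.length_cons]
      omega
    · have hr : '/' ∈ rest := by
        rcases List.mem_cons.mp h with h' | h'
        · exact absurd h'.symm hc
        · exact h'
      obtain ⟨a, t, ht⟩ := List.exists_cons_of_ne_nil (pvSplitChar_ne_nil rest)
      have h2 := ih hr
      rw [ht] at h2
      simp only [pvSplitChar, if_neg hc, ht, List.modifyHead, List.length_cons] at *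
      omega

theorem pvSplitChar_headD (cs : List Char) : (pvSplitChar cs).headD [] = pvScan cs := by
  induction cs with
  | nil => rfl
  | cons c rest ih =>
    by_cases hc : c = '/'
    · simp [pvSplitChar, pvScan, hc]
    · obtain ⟨a, t, ht⟩ := List.exists_cons_of_ne_nil (pvSplitChar_ne_nil rest)
      rw [ht] at ih
      simp only [List.headD_cons] at ih
      simp [pvSplitChar, pvScan, hc, ht, List.modifyHead, ih]

theorem pvSplitChar_getLast? (cs : List Char) :
    (pvSplitChar cs).getLast? = some ((pvScan cs.reverse).reverse) := by
  induction cs with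
  | nil => rfl
  | cons c rest ih =>
    by_cases hc : c = '/'
    · have hscan : pvScan (rest.reverse ++ [c]) = pvScan rest.reverse := by
        rw [pvScan_append]
        by_cases hm : '/' ∈ rest.reverse
        · simp [hm]
        · simp [hm, pvScan, hc, pvScan_of_not_mem hm]
      obtain ⟨a, t, ht⟩ := List.exists_cons_of_ne_nil (pvSplitChar_ne_nil rest)
      rw [ht] at ih
      simp only [pvSplitChar, if_pos hc, List.reverse_cons, hscan, ht]
      simp only [List.getLast?_cons, Option.getD_some] at ih ⊢
      exact ih
    · by_cases hm : '/' ∈ rest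
      · obtain ⟨a, t, ht⟩ := List.exists_cons_of_ne_nil (pvSplitChar_ne_nil rest)
        have ht2 : t ≠ [] := by
          have h2 := pvSplitChar_two_le hm
          rw [ht] at h2
          intro h; rw [h] at h2; simp at h2
        obtain ⟨z, hz⟩ : ∃ z, t.getLast? = some z := by
          cases hzz : t.getLast? with
          | none => exact absurd (List.getLast?_eq_none_iff.mp hzz) ht2
          | some z => exact ⟨z, rfl⟩
        have hscan : pvScan (rest.reverse ++ [c]) = pvScan rest.reverse := by
          rw [pvScan_append, if_pos (by simpa using hm)]
        rw [ht] at ih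
        simp only [pvSplitChar, if_neg hc, ht, List.modifyHead, List.reverse_cons, hscan]
        simp only [List.getLast?_cons, hz, Option.getD_some] at ih ⊢
        exact ih
      · have hmr : '/' ∉ rest.reverse := by simpa using hm
        rw [pvSplitChar_of_not_mem (by simp [List.mem_cons, hm, Ne.symm hc])]
        have hscan : pvScan (rest.reverse ++ [c]) = rest.reverse ++ [c] :=
          pvScan_of_not_mem (by simp [List.mem_append, hmr, Ne.symm hc])
        simp [List.reverse_cons, hscan]

theorem pv_go_eq (cs : List Char) : ∀ (fuel : Nat) (cur : List Char) (acc : List (List Char)),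
    cs.length ≤ fuel →
    PySem.Chars.splitOn.go ['/'] fuel cs cur acc
      = acc.reverse ++ (pvSplitChar cs).modifyHead (cur.reverse ++ ·) := by
  induction cs with
  | nil =>
    intro fuel cur acc _
    cases fuel <;> simp [PySem.Chars.splitOn.go, pvSplitChar, List.modifyHead]
  | cons c rest ih =>
    intro fuel cur acc hf
    cases fuel with
    | zero => simp at hf
    | succ f =>
      have hpre : List.isPrefixOf ['/'] (c :: rest) = (c == '/') := by
        simp [List.isPrefixOf, Bool.and_comm, eq_comm]
      by_cases hc : c = '/'
      · have hstep : PySem.Chars.splitOn.go ['/'] (f+1) (c :: rest) cur acc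
            = PySem.Chars.splitOn.go ['/'] f rest [] (cur.reverse :: acc) := by
          simp [PySem.Chars.splitOn.go, hc]
        rw [hstep, ih f [] (cur.reverse :: acc) (by simpa using Nat.le_of_succ_le_succ hf)]
        obtain ⟨a, t, ht⟩ := List.exists_cons_of_ne_nil (pvSplitChar_ne_nil rest)
        simp [pvSplitChar, hc, ht, List.modifyHead]
      · have hstep : PySem.Chars.splitOn.go ['/'] (f+1) (c :: rest) cur acc
            = PySem.Chars.splitOn.go ['/'] f rest (c :: cur) acc := by
          simp [PySem.Chars.splitOn.go, hpre, hc]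
        rw [hstep, ih f (c :: cur) acc (by simpa using Nat.le_of_succ_le_succ hf)]
        obtain ⟨a, t, ht⟩ := List.exists_cons_of_ne_nil (pvSplitChar_ne_nil rest)
        simp [pvSplitChar, hc, ht, List.modifyHead]

theorem pv_splitOn_eq (cs : List Char) : PySem.Chars.splitOn cs ['/'] = pvSplitChar cs := by
  have h := pv_go_eq cs (cs.length + 1) [] [] (Nat.le_succ _)
  rw [PySem.Chars.splitOn, h]
  obtain ⟨a, t, ht⟩ := List.exists_cons_of_ne_nil (pvSplitChar_ne_nil cs)
  simp [ht, List.modifyHead]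

theorem pv_row_cond_eq (month year : String) (row : List String) :
    ((String.ofList (pvScan (PySem.List.pyGetD row 0 "").toList) == month
        || String.ofList (pvScan (PySem.List.pyGetD row 0 "").toList) == ("0" ++ month))
      && (String.ofList ((PySem.List.slice? (String.ofList (pvScan ((PySem.List.slice? (PySem.List.pyGetD row 0 "").toList none none (-1)).getD []))).toList none none (-1)).getD []) == year
        || String.ofList ((PySem.List.slice? (String.ofList (pvScan ((PySem.List.slice? (PySem.List.pyGetD row 0 "").toList none none (-1)).getD []))).toList none none (-1)).getD []) == ("20" ++ year)))
    = pvKeep [month, "0" ++ month] [year, "20" ++ year] row := by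
  set date := PySem.List.pyGetD row 0 "" with hdate
  obtain ⟨a, t, ht⟩ := List.exists_cons_of_ne_nil (pvSplitChar_ne_nil date.toList)
  have hsplit : PySem.Chars.split? date.toList ("/" : String).toList = some (a :: t) := by
    have h : ("/" : String).toList = ['/'] := rfl
    simp [PySem.Chars.split?, h, pv_splitOn_eq, ht]
  have hhead : a = pvScan date.toList := by
    have h := pvSplitChar_headD date.toList
    rw [ht] at h
    simp only [List.headD_cons] at h
    exact h
  have hlastcs : (List.map String.ofList (a :: t)).getLast?
      = some (String.ofList ((pvScan date.toList.reverse).reverse)) := by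
    rw [List.getLast?_map, ← ht, pvSplitChar_getLast? date.toList, Option.map_some]
  have hneg : PySem.List.pyGetD (List.map String.ofList (a :: t)) (-1) ""
      = String.ofList ((pvScan date.toList.reverse).reverse) := by
    simp only [PySem.List.pyGetD, PySem.List.pyGet?_neg_one, hlastcs, Option.getD_some]
  have h0 : PySem.List.pyGetD (List.map String.ofList (a :: t)) 0 "" = String.ofList a := by
    simp
  simp only [pvKeep, PySem.Str.split?]
  rw [← hdate]
  simp only [hsplit, Option.map_some, Option.getD_some]
  rw [hneg, h0, hhead]
  simp only [PySem.List.slice?_none_none_neg_one, Option.getD_some, String.toList_ofList]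
  rw [Bool.eq_iff_iff]
  constructor <;> intro h <;> simp_all

theorem pv_bodies_eq (transactions : List (List String)) (month year : String) :
    only_include_month_and_year transactions month year = only_include_month_and_year_alt transactions month year := by
  simp only [only_include_month_and_year, only_include_month_and_year_alt]
  simp only [pv_row_cond_eq month year]
  simpa using PySem.List.foldl_append_if
    (pvKeep [month, "0" ++ month] [year, "20" ++ year]) (fun r => r) transactions []

-- ===== VERDICT (by name: the statement is the Claim_ definition above) =====
theorem only_include_month_and_year_spec : Claim_equal_only_include_month_and_year := by
  intro transactions month year _ _
  unfold Spec_only_include_month_and_year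
  exact pv_bodies_eq transactions month year
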